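-- pv_equiv track=rewrite | github.com/cyrDhanush/leet-code-practice | jumpgame.py | findExceptions
-- ===== SOURCE A (Python) =====
-- def findExceptions(nums):
--     exceptionIndices=[]
--     for i in range(len(nums)):
--         if(nums[i]==0):
--             pass
--         else:
--             l=i+1
--             r=i+1+nums[i]
--             if(r>=len(nums)):
--                 r=len(nums)-1
--             else:
--                 tempList=nums[l:r]
--                 if(tempList==([0]*len(tempList)) and len(tempList)!=0):
--                     exceptionIndices.append(i)
--     return exceptionIndices
-- ===== SOURCE B (Python) =====
-- def findExceptions(nums):
--     n = len(nums)
--     pref = [0] * (n + 1)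
--     for j in range(n):
--         pref[j + 1] = pref[j] + (1 if nums[j] != 0 else 0)
--     res = []
--     for i, v in enumerate(nums):
--         r = i + 1 + v
--         if v >= 1 and r < n:
--             if pref[r] == pref[i + 1]:
--                 res.append(i)
--     return res
-- ===== Notes on version B (the rewrite author's own statement) =====
-- stated objective: faster
-- what changed: B replaces A's per-index slice-and-compare of nums[i+1:i+1+nums[i]] against a fresh zero list (O(n) work per index) with a prefix-sum of nonzero counts built once, so each range's all-zero test is an O(1) subtraction.
-- intended difference: On lists where some nums[k] is so negative that k+1+nums[k] < 0 and the Python slice nums[k+1:k+1+nums[k]] wraps around to a nonempty all-zero suffix, A appends k (returns e.g. [0] on [-2,0,0]) via negative-index wraparound; B returns the list without such k (e.g. []), the intended value since a negative jump covers no range. — e.g. on findExceptions([-2, 0, 0]): A returns [0], B returns []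
import Mathlib
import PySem

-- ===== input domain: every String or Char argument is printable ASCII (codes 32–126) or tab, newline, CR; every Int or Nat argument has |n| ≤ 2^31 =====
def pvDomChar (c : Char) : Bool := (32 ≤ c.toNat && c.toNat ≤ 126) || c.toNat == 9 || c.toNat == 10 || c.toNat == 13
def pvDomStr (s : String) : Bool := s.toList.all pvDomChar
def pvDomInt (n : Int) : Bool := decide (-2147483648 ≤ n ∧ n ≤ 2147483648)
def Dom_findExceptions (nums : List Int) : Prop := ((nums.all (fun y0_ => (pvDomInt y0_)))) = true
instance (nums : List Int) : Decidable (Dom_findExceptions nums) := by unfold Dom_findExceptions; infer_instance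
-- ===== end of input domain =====

-- B builds a prefix-sum of nonzero counts once, turning A's per-index O(n) slice comparison
-- into an O(1) range query (asymptotic speed-up); return-value equivalence outside D_ below.

-- ===== PORT A =====
def findExceptions (nums : List Int) : List Int :=
  (PySem.List.pyRange 0 (PySem.List.len nums) 1).foldl (fun acc i =>
    if PySem.List.pyGetD nums i 0 = 0 then acc
    else
      let l : Int := i + 1
      let r : Int := i + 1 + PySem.List.pyGetD nums i 0
      if (PySem.List.len nums) ≤ r then acc  -- Python: r = len(nums)-1, and nothing is appended
      else
        let tempList := PySem.List.slice nums (some l) (some r)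
        if tempList = List.replicate tempList.length 0 ∧ tempList.length ≠ 0
        then acc ++ [i] else acc) []

-- ===== PORT B =====
def findExceptions_alt (nums : List Int) : List Int :=
  let n : Int := PySem.List.len nums
  let pref : List Int := nums.scanl (fun s x => s + (if x ≠ 0 then 1 else 0)) (0 : Int)
  (PySem.List.enumerate nums 0).foldl (fun acc iv =>
    let r : Int := iv.1 + 1 + iv.2
    if 1 ≤ iv.2 ∧ r < n then
      if pref.getD r.toNat 0 = pref.getD (iv.1 + 1).toNat 0 then acc ++ [iv.1] else acc
    else acc) []

-- ===== PRECONDITION & SPEC =====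
-- On lists where some nums[k] is so negative that k+1+nums[k] < 0 and Python's slice
-- nums[k+1:k+1+nums[k]] wraps around to a nonempty all-zero suffix, A appends k (negative-index
-- wraparound); B omits such k, the intended value since a negative jump covers no range.
def D_findExceptions (nums : List Int) : Prop :=
  ∃ k ∈ List.range nums.length,
    nums.getD k 0 + k + 1 < 0 ∧
    0 < nums.length + nums.getD k 0 ∧
    ∀ x ∈ (nums.drop (k + 1)).take (nums.length + nums.getD k 0).toNat, x = 0
instance (nums : List Int) : Decidable (D_findExceptions nums) := by
  unfold D_findExceptions; infer_instance
def Spec_findExceptions (nums : List Int) (out : List Int) : Prop :=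
  ¬ D_findExceptions nums → out = findExceptions_alt nums
instance (nums : List Int) (out : List Int) : Decidable (Spec_findExceptions nums out) := by
  unfold Spec_findExceptions; infer_instance
def pvDiffWitness_findExceptions : List Int := [-2, 0, 0]
def pvDiffWitnessOut_findExceptions : (List Int) × (List Int) := ([0], [])

-- ===== CLAIM (what is proved, stated in full; the proofs are below) =====
def Claim_unchanged_findExceptions : Prop :=
  ∀ (nums : List Int), Dom_findExceptions nums → Spec_findExceptions nums (findExceptions nums)
def Claim_changed_findExceptions : Prop :=
  Dom_findExceptions (pvDiffWitness_findExceptions) ∧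
  D_findExceptions (pvDiffWitness_findExceptions) ∧
  findExceptions (pvDiffWitness_findExceptions) = pvDiffWitnessOut_findExceptions.1 ∧
  findExceptions_alt (pvDiffWitness_findExceptions) = pvDiffWitnessOut_findExceptions.2 ∧
  pvDiffWitnessOut_findExceptions.1 ≠ pvDiffWitnessOut_findExceptions.2
def Claim_exact_findExceptions : Prop :=
  ∀ (nums : List Int), Dom_findExceptions nums → D_findExceptions nums →
    findExceptions nums ≠ findExceptions_alt nums

-- ===== LEMMAS AND PROOFS =====

-- A's append condition for loop index i, as a predicate
def pvPA (nums : List Int) (i : Int) : Bool :=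
  decide (¬ PySem.List.pyGetD nums i 0 = 0 ∧
  ¬ PySem.List.len nums ≤ i + 1 + PySem.List.pyGetD nums i 0 ∧
  (PySem.List.slice nums (some (i + 1)) (some (i + 1 + PySem.List.pyGetD nums i 0))
      = List.replicate (PySem.List.slice nums (some (i + 1))
          (some (i + 1 + PySem.List.pyGetD nums i 0))).length 0 ∧
   (PySem.List.slice nums (some (i + 1))
      (some (i + 1 + PySem.List.pyGetD nums i 0))).length ≠ 0))

lemma pvPA_iff (nums : List Int) (i : Int) : pvPA nums i = true ↔
    (¬ PySem.List.pyGetD nums i 0 = 0 ∧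
     ¬ PySem.List.len nums ≤ i + 1 + PySem.List.pyGetD nums i 0 ∧
     (PySem.List.slice nums (some (i + 1)) (some (i + 1 + PySem.List.pyGetD nums i 0))
        = List.replicate (PySem.List.slice nums (some (i + 1))
            (some (i + 1 + PySem.List.pyGetD nums i 0))).length 0 ∧
      (PySem.List.slice nums (some (i + 1))
        (some (i + 1 + PySem.List.pyGetD nums i 0))).length ≠ 0)) := by
  simp [pvPA]

-- B's append condition for an enumerate pair
def pvPB (nums : List Int) (p : Int × Int) : Bool :=
  decide ((1 ≤ p.2 ∧ p.1 + 1 + p.2 < PySem.List.len nums) ∧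
  (nums.scanl (fun s x => s + (if x ≠ 0 then 1 else 0)) (0 : Int)).getD (p.1 + 1 + p.2).toNat 0
    = (nums.scanl (fun s x => s + (if x ≠ 0 then 1 else 0)) (0 : Int)).getD (p.1 + 1).toNat 0)

lemma pvPB_iff (nums : List Int) (p : Int × Int) : pvPB nums p = true ↔
    ((1 ≤ p.2 ∧ p.1 + 1 + p.2 < PySem.List.len nums) ∧
     (nums.scanl (fun s x => s + (if x ≠ 0 then 1 else 0)) (0 : Int)).getD (p.1 + 1 + p.2).toNat 0
       = (nums.scanl (fun s x => s + (if x ≠ 0 then 1 else 0)) (0 : Int)).getD (p.1 + 1).toNat 0) := by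
  simp [pvPB]

lemma pvA_eq_filter (nums : List Int) :
    findExceptions nums
      = (PySem.List.pyRange 0 (PySem.List.len nums)).filter (pvPA nums) := by
  unfold findExceptions
  have hbody : (fun (acc : List Int) (i : Int) =>
      if PySem.List.pyGetD nums i 0 = 0 then acc
      else
        let l : Int := i + 1
        let r : Int := i + 1 + PySem.List.pyGetD nums i 0
        if (PySem.List.len nums) ≤ r then acc
        else
          let tempList := PySem.List.slice nums (some l) (some r)
          if tempList = List.replicate tempList.length 0 ∧ tempList.length ≠ 0
          then acc ++ [i] else acc)
      = fun acc i => if pvPA nums i then acc ++ [i] else acc := by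
    funext acc i
    show (if PySem.List.pyGetD nums i 0 = 0 then acc
      else if (PySem.List.len nums) ≤ i + 1 + PySem.List.pyGetD nums i 0 then acc
      else if PySem.List.slice nums (some (i + 1))
            (some (i + 1 + PySem.List.pyGetD nums i 0))
            = List.replicate (PySem.List.slice nums (some (i + 1))
                (some (i + 1 + PySem.List.pyGetD nums i 0))).length 0 ∧
            (PySem.List.slice nums (some (i + 1))
                (some (i + 1 + PySem.List.pyGetD nums i 0))).length ≠ 0
        then acc ++ [i] else acc)
      = if pvPA nums i then acc ++ [i] else acc
    by_cases h1 : PySem.List.pyGetD nums i 0 = 0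
    · rw [if_pos h1, if_neg (fun h => ((pvPA_iff nums i).mp h).1 h1)]
    · rw [if_neg h1]
      by_cases h2 : (PySem.List.len nums) ≤ i + 1 + PySem.List.pyGetD nums i 0
      · rw [if_pos h2, if_neg (fun h => ((pvPA_iff nums i).mp h).2.1 h2)]
      · rw [if_neg h2]
        by_cases h3 : PySem.List.slice nums (some (i + 1))
            (some (i + 1 + PySem.List.pyGetD nums i 0))
            = List.replicate (PySem.List.slice nums (some (i + 1))
                (some (i + 1 + PySem.List.pyGetD nums i 0))).length 0 ∧
            (PySem.List.slice nums (some (i + 1))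
                (some (i + 1 + PySem.List.pyGetD nums i 0))).length ≠ 0
        · rw [if_pos h3, if_pos ((pvPA_iff nums i).mpr ⟨h1, h2, h3⟩)]
        · rw [if_neg h3, if_neg (fun h => h3 ((pvPA_iff nums i).mp h).2.2)]
  rw [hbody, PySem.List.foldl_append_if_eq_filter (pvPA nums)]
  simp

lemma pvB_eq_filter (nums : List Int) :
    findExceptions_alt nums
      = (PySem.List.pyRange 0 (PySem.List.len nums)).filter
          (fun j => pvPB nums (j, PySem.List.pyGetD nums j 0)) := by
  unfold findExceptions_alt
  show List.foldl (fun (acc : List Int) (iv : Int × Int) =>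
      let r : Int := iv.1 + 1 + iv.2
      if 1 ≤ iv.2 ∧ r < PySem.List.len nums then
        if (nums.scanl (fun s x => s + (if x ≠ 0 then 1 else 0)) (0 : Int)).getD r.toNat 0
            = (nums.scanl (fun s x => s + (if x ≠ 0 then 1 else 0)) (0 : Int)).getD (iv.1 + 1).toNat 0
        then acc ++ [iv.1] else acc
      else acc) [] (PySem.List.enumerate nums)
    = (PySem.List.pyRange 0 (PySem.List.len nums)).filter
        (fun j => pvPB nums (j, PySem.List.pyGetD nums j 0))
  have hbody : (fun (acc : List Int) (iv : Int × Int) =>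
      let r : Int := iv.1 + 1 + iv.2
      if 1 ≤ iv.2 ∧ r < PySem.List.len nums then
        if (nums.scanl (fun s x => s + (if x ≠ 0 then 1 else 0)) (0 : Int)).getD r.toNat 0
            = (nums.scanl (fun s x => s + (if x ≠ 0 then 1 else 0)) (0 : Int)).getD (iv.1 + 1).toNat 0
        then acc ++ [iv.1] else acc
      else acc)
      = fun acc iv => if pvPB nums iv then acc ++ [iv.1] else acc := by
    funext acc iv
    show (if 1 ≤ iv.2 ∧ iv.1 + 1 + iv.2 < PySem.List.len nums then
        if (nums.scanl (fun s x => s + (if x ≠ 0 then 1 else 0)) (0 : Int)).getD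
            (iv.1 + 1 + iv.2).toNat 0
            = (nums.scanl (fun s x => s + (if x ≠ 0 then 1 else 0)) (0 : Int)).getD (iv.1 + 1).toNat 0
        then acc ++ [iv.1] else acc
      else acc)
      = if pvPB nums iv then acc ++ [iv.1] else acc
    by_cases h1 : 1 ≤ iv.2 ∧ iv.1 + 1 + iv.2 < PySem.List.len nums
    · rw [if_pos h1]
      by_cases h2 : (nums.scanl (fun s x => s + (if x ≠ 0 then 1 else 0)) (0 : Int)).getD
          (iv.1 + 1 + iv.2).toNat 0
          = (nums.scanl (fun s x => s + (if x ≠ 0 then 1 else 0)) (0 : Int)).getD (iv.1 + 1).toNat 0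
      · rw [if_pos h2, if_pos ((pvPB_iff nums iv).mpr ⟨h1, h2⟩)]
      · rw [if_neg h2, if_neg (fun h => h2 ((pvPB_iff nums iv).mp h).2)]
    · rw [if_neg h1, if_neg (fun h => h1 ((pvPB_iff nums iv).mp h).1)]
  rw [hbody, PySem.List.foldl_append_if (fun iv => pvPB nums iv) Prod.fst]
  rw [PySem.List.enumerate_eq_map_pyRange nums 0, List.filter_map, List.map_map]
  simp [Function.comp_def]

-- the prefix list B builds: entry m is the nonzero count of the first m elements
lemma pvScanl_getD_count (l : List Int) :
    ∀ (m : Nat) (c : Int), m ≤ l.length →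
      (l.scanl (fun s x => s + (if x ≠ 0 then 1 else 0)) c).getD m 0
        = c + ((l.take m).countP (fun x => decide (x ≠ 0)) : Int) := by
  induction l with
  | nil =>
    intro m c h
    have hm : m = 0 := Nat.le_zero.mp (by simpa using h)
    subst hm
    simp [List.scanl]
  | cons a l ih =>
    intro m c h
    cases m with
    | zero => simp [List.scanl_cons]
    | succ m =>
      rw [List.scanl_cons]
      simp only [List.getD_cons_succ, List.take_succ_cons, List.countP_cons]
      rw [ih m _ (by simpa using h)]
      by_cases ha : a = 0 <;> simp [ha] <;> push_cast <;> ring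

-- pointwise: outside the wraparound region the two conditions agree
lemma pvPoint (nums : List Int) (k : Nat) (hk : k < nums.length)
    (hW : ¬ (nums.getD k 0 + k + 1 < 0 ∧
        0 < nums.length + nums.getD k 0 ∧
        ∀ x ∈ (nums.drop (k + 1)).take (nums.length + nums.getD k 0).toNat, x = 0)) :
    pvPA nums (k : Int) = pvPB nums ((k : Int), nums.getD k 0) := by
  apply Bool.eq_iff_iff.mpr
  rw [pvPA_iff, pvPB_iff]
  have hlen : PySem.List.len nums = (nums.length : Int) := by simp
  have hget : PySem.List.pyGetD nums (k : Int) 0 = nums.getD k 0 := by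
    simp [PySem.List.pyGetD_natCast]
  set v := nums.getD k 0 with hv
  rw [hget, hlen]
  by_cases hv1 : 1 ≤ v
  · by_cases hr : (k : Int) + 1 + v < (nums.length : Int)
    · -- normal case: compare the slice test with the prefix-sum test
      have hsl : PySem.List.slice nums (some ((k : Int) + 1)) (some ((k : Int) + 1 + v))
          = (nums.drop (k + 1)).take v.toNat := by
        rw [PySem.List.slice_toNat nums (by omega) (by omega)]
        congr 1 <;> omega
      have hr1 : ((k : Int) + 1 + v).toNat = (k + 1) + v.toNat := by omega
      have hr2 : ((k : Int) + 1).toNat = k + 1 := by omega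
      have hle : (k + 1) + v.toNat ≤ nums.length := by omega
      have hp1 := pvScanl_getD_count nums ((k + 1) + v.toNat) 0 hle
      have hp2 := pvScanl_getD_count nums (k + 1) 0 (by omega)
      have htk : nums.take ((k + 1) + v.toNat)
          = nums.take (k + 1) ++ (nums.drop (k + 1)).take v.toNat := List.take_add
      have hlength : ((nums.drop (k + 1)).take v.toNat).length = v.toNat := by
        simp
        omega
      constructor
      · rintro ⟨-, -, hrep, -⟩
        refine ⟨⟨hv1, hr⟩, ?_⟩
        rw [hr1, hr2, hp1, hp2, htk, List.countP_append]
        have hall : ∀ x ∈ (nums.drop (k + 1)).take v.toNat, x = 0 := by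
          rw [hsl] at hrep
          exact fun x hx => (List.eq_replicate_iff.mp hrep).2 x hx
        have : ((nums.drop (k + 1)).take v.toNat).countP (fun x => decide (x ≠ 0)) = 0 :=
          List.countP_eq_zero.mpr (by intro x hx; simp [hall x hx])
        rw [this]
        push_cast
        ring
      · rintro ⟨⟨-, -⟩, hpref⟩
        rw [hr1, hr2, hp1, hp2, htk, List.countP_append] at hpref
        have hc0 : ((nums.drop (k + 1)).take v.toNat).countP (fun x => decide (x ≠ 0)) = 0 := by
          omega
        have hall := List.countP_eq_zero.mp hc0
        refine ⟨by omega, by omega, ?_, ?_⟩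
        · rw [hsl]
          exact List.eq_replicate_iff.mpr ⟨rfl, fun x hx => by
            have := hall x hx; simpa using this⟩
        · rw [hsl, hlength]
          omega
    · -- jump exceeds the list: A takes the r = len-1 branch, B's bound fails
      constructor
      · rintro ⟨-, h2, -⟩; exact absurd (by omega) h2
      · rintro ⟨⟨-, h2⟩, -⟩; exact absurd h2 hr
  · by_cases hv0 : v = 0
    · -- nums[k] == 0: both skip
      constructor
      · rintro ⟨h1, -⟩; exact absurd hv0 h1
      · rintro ⟨⟨h1, -⟩, -⟩; omega
    · -- v ≤ -1: B skips; A's slice is empty or (excluded) wraps around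
      have hvneg : v ≤ -1 := by omega
      constructor
      · rintro ⟨-, -, hrep, hne⟩
        exfalso
        by_cases hr0 : 0 ≤ (k : Int) + 1 + v
        · -- nonnegative stop below start: empty slice
          rw [PySem.List.slice_toNat nums (by omega) hr0] at hne
          have : ((k : Int) + 1 + v).toNat - ((k : Int) + 1).toNat = 0 := by omega
          rw [this] at hne
          simp at hne
        · -- negative stop: Python wraps; exactly the D_ region
          have hcl1 : PySem.List.clampIdx nums.length ((k : Int) + 1) = k + 1 := by
            have hcast : ((k : Int) + 1) = ((k + 1 : Nat) : Int) := by push_cast; ring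
            rw [hcast, PySem.List.clampIdx_natCast]
            omega
          have hcl2 : PySem.List.clampIdx nums.length ((k : Int) + 1 + v)
              = ((nums.length : Int) + ((k : Int) + 1 + v)).toNat := by
            simp only [PySem.List.clampIdx]
            rw [if_pos (by omega)]
            split <;> omega
          have hsl : PySem.List.slice nums (some ((k : Int) + 1)) (some ((k : Int) + 1 + v))
              = (nums.drop (k + 1)).take
                  ((nums.length : Int) + v).toNat := by
            simp only [PySem.List.slice, hcl1, hcl2]
            congr 1
            omega
          rw [hsl] at hrep hne
          apply hW
          refine ⟨by omega, ?_, fun x hx => (List.eq_replicate_iff.mp hrep).2 x hx⟩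
          -- nonemptiness of the wrapped slice forces 0 < len + v
          have hlen2 : ((nums.drop (k + 1)).take
              ((nums.length : Int) + v).toNat).length
              = min ((nums.length : Int) + v).toNat
                  (nums.length - (k + 1)) := by simp
          rw [hlen2] at hne
          omega
      · rintro ⟨⟨h1, -⟩, -⟩; omega

-- ===== VERDICT (by name: the statement is the Claim_ definition above) =====
theorem findExceptions_spec : Claim_unchanged_findExceptions := by
  intro nums _ hnd
  rw [pvA_eq_filter, pvB_eq_filter]
  apply List.filter_congr
  intro i hi
  rw [PySem.List.mem_pyRange_one] at hi
  have hlen : PySem.List.len nums = (nums.length : Int) := by simp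
  rw [hlen] at hi
  have hik : i = ((i.toNat : Nat) : Int) := by omega
  rw [hik]
  have hk : i.toNat < nums.length := by omega
  have hget : PySem.List.pyGetD nums ((i.toNat : Nat) : Int) 0 = nums.getD i.toNat 0 :=
    PySem.List.pyGetD_natCast nums i.toNat 0
  rw [hget]
  apply pvPoint nums i.toNat hk
  intro hbody
  exact hnd ⟨i.toNat, List.mem_range.mpr hk, hbody⟩

theorem findExceptions_changed : Claim_changed_findExceptions := by
  unfold Claim_changed_findExceptions; decide

theorem findExceptions_tight : Claim_exact_findExceptions := by
  intro nums _ hD heq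
  obtain ⟨k, hkmem, hr, hpos, hall⟩ := hD
  have hk : k < nums.length := List.mem_range.mp hkmem
  set v := nums.getD k 0 with hv
  have hvneg : v ≤ -1 := by omega
  have hkn : k + 1 < nums.length := by omega
  have hget : PySem.List.pyGetD nums ((k : Nat) : Int) 0 = v := by
    simp [PySem.List.pyGetD_natCast, hv]
  have hlen : PySem.List.len nums = (nums.length : Int) := by simp
  -- the wrapped slice, explicitly
  have hcl1 : PySem.List.clampIdx nums.length ((k : Int) + 1) = k + 1 := by
    have hcast : ((k : Int) + 1) = ((k + 1 : Nat) : Int) := by push_cast; ring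
    rw [hcast, PySem.List.clampIdx_natCast]
    omega
  have hcl2 : PySem.List.clampIdx nums.length ((k : Int) + 1 + v)
      = ((nums.length : Int) + ((k : Int) + 1 + v)).toNat := by
    simp only [PySem.List.clampIdx]
    rw [if_pos (by omega)]
    split <;> omega
  have hsl : PySem.List.slice nums (some ((k : Int) + 1)) (some ((k : Int) + 1 + v))
      = (nums.drop (k + 1)).take ((nums.length : Int) + v).toNat := by
    simp only [PySem.List.slice, hcl1, hcl2]
    congr 1
    omega
  have hlength : ((nums.drop (k + 1)).take
      ((nums.length : Int) + v).toNat).length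
      = min ((nums.length : Int) + v).toNat
          (nums.length - (k + 1)) := by simp
  -- k is in A's output …
  have hPA : pvPA nums (k : Int) = true := by
    rw [pvPA_iff, hget, hlen]
    refine ⟨by omega, by omega, ?_, ?_⟩
    · rw [hsl]
      exact List.eq_replicate_iff.mpr ⟨rfl, hall⟩
    · rw [hsl, hlength]
      omega
  have hmemA : (k : Int) ∈ findExceptions nums := by
    rw [pvA_eq_filter]
    refine List.mem_filter.mpr ⟨?_, hPA⟩
    rw [PySem.List.mem_pyRange_one, hlen]
    omega
  -- … but not in B's
  have hmemB : (k : Int) ∉ findExceptions_alt nums := by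
    rw [pvB_eq_filter]
    intro hmem
    have := (pvPB_iff nums _).mp (List.mem_filter.mp hmem).2
    -- impossible: pvPB needs 1 ≤ nums[k]
    have h1 := this.1.1
    rw [hget] at h1
    omega
  rw [heq] at hmemA
  exact hmemB hmemA
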